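-- pv_equiv track=rewrite | github.com/GGraziani/2019-proj1-god-classes | evaluation/ground_truth.py | do_ground_truth
-- ===== SOURCE A (Python) =====
-- def do_ground_truth(methods, keywords):
-- 	gt = {}
-- 	for m in methods:
-- 		k = find_match(m, keywords)
--
-- 		if k in gt:
-- 			gt[k] = gt[k] + [m]
-- 		else:
-- 			gt[k] = [m]
--
-- 	return gt
--
-- def find_match(name, kws):
-- 	for k in kws:
-- 		if k in name.lower():
-- 			return k
-- 	return "none"
-- ===== SOURCE B (Python) =====
-- def do_ground_truth(methods, keywords):
--     lowered = [m.lower() for m in methods]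
--     best = [None] * len(methods)
--     for k in keywords:
--         for i, ml in enumerate(lowered):
--             if best[i] is None and k in ml:
--                 best[i] = k
--     gt = {}
--     for m, b in zip(methods, best):
--         gt.setdefault(b if b is not None else "none", []).append(m)
--     return gt
-- ===== Notes on version B (the rewrite author's own statement) =====
-- stated objective: alternative
-- what changed: B inverts the loop nesting: instead of A's per-method scan over keywords (find_match) appending into the dict entry by entry, B makes one keyword-outer pass that fills a position-indexed assignment array and then a single grouping sweep over the methods using setdefault/append.
import Mathlib
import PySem

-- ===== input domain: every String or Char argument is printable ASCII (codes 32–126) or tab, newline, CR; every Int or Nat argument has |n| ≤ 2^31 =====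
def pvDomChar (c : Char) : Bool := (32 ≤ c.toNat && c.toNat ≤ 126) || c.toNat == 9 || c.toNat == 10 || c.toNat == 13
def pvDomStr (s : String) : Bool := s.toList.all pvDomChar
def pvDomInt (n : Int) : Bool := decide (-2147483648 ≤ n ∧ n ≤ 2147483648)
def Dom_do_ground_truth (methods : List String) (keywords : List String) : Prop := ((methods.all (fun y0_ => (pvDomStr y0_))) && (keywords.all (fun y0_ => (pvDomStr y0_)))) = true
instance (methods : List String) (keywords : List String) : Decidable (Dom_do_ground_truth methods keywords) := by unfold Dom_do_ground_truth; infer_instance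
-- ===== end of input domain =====

-- B replaces A's per-method first-match scan by a keyword-outer pass over an index-tracked
-- assignment array plus one grouping sweep (objective: alternative decomposition, same cost).

-- ===== PORT A =====
def find_match (name : String) (kws : List String) : String :=
  match kws with
  | [] => "none"
  | k :: rest => if PySem.Str.isIn k (PySem.Str.lower name) then k else find_match name rest

def do_ground_truth (methods : List String) (keywords : List String) : List (String × List String) :=
  (methods.foldl (fun gt m =>
      let k := find_match m keywords
      if PySem.Dict.contains gt k then
        PySem.Dict.insert gt k (PySem.Dict.getD gt k [] ++ [m])
      else
        PySem.Dict.insert gt k [m])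
    PySem.Dict.empty).items

-- ===== PORT B =====
def do_ground_truth_alt (methods : List String) (keywords : List String) : List (String × List String) :=
  let lowered := methods.map PySem.Str.lower
  let best := keywords.foldl
      (fun best k =>
        (best.zip lowered).map (fun p => if p.1 = none ∧ PySem.Str.isIn k p.2 then some k else p.1))
      (List.replicate methods.length (none : Option String))
  ((methods.zip best).foldl (fun gt p =>
      -- gt.setdefault(key, []).append(m): in-place append = overwrite with the extended list
      let key := p.2.getD "none"
      PySem.Dict.insert gt key (PySem.Dict.getD gt key [] ++ [p.1]))
    PySem.Dict.empty).items

-- ===== PRECONDITION & SPEC =====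
def Spec_do_ground_truth (methods : List String) (keywords : List String) (out : List (String × List String)) : Prop := out = do_ground_truth_alt methods keywords
instance (methods : List String) (keywords : List String) (out : List (String × List String)) : Decidable (Spec_do_ground_truth methods keywords out) := by unfold Spec_do_ground_truth; infer_instance

-- ===== CLAIM (what is proved, stated in full; the proofs are below) =====
def Claim_equal_do_ground_truth : Prop := ∀ (methods : List String) (keywords : List String), Dom_do_ground_truth methods keywords → Spec_do_ground_truth methods keywords (do_ground_truth methods keywords)

-- ===== LEMMAS AND PROOFS =====

-- first keyword (in order) that occurs in ml, if any
def pvFM (ks : List String) (ml : String) : Option String :=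
  ks.find? (fun k => PySem.Str.isIn k ml)

theorem pv_find_match_eq (m : String) (ks : List String) :
    find_match m ks = (pvFM ks (PySem.Str.lower m)).getD "none" := by
  induction ks with
  | nil => simp [find_match, pvFM]
  | cons k rest ih =>
    simp only [find_match, pvFM, List.find?]
    cases h : PySem.Str.isIn k (PySem.Str.lower m) <;> simp_all [pvFM]

theorem pv_zip_map_eq_zipWith {α β γ : Type} (f : α → β → γ) (xs : List α) (ys : List β) :
    (xs.zip ys).map (fun p => f p.1 p.2) = List.zipWith f xs ys := by
  induction xs generalizing ys with
  | nil => simp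
  | cons x xs ih => cases ys <;> simp [ih]

theorem pv_zipWith_left {α β : Type} (xs : List α) (ys : List β)
    (h : xs.length ≤ ys.length) : List.zipWith (fun a _ => a) xs ys = xs := by
  induction xs generalizing ys with
  | nil => simp
  | cons x xs ih =>
    cases ys with
    | nil => simp at h
    | cons y ys => simp at h; simp [ih _ h]

theorem pv_zipWith_zipWith {α β γ δ : Type} (f : α → β → γ) (g : γ → β → δ) (h : α → β → δ)
    (hpt : ∀ a b, g (f a b) b = h a b) (xs : List α) (ys : List β) :
    List.zipWith g (List.zipWith f xs ys) ys = List.zipWith h xs ys := by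
  induction xs generalizing ys with
  | nil => simp
  | cons x xs ih => cases ys <;> simp [hpt, ih]

-- the keyword-outer fold computes, per slot, "already assigned, else first match"
theorem pv_best_fold (ks : List String) (best : List (Option String)) (ls : List String)
    (hlen : best.length ≤ ls.length) :
    ks.foldl
      (fun best k =>
        (best.zip ls).map (fun p => if p.1 = none ∧ PySem.Str.isIn k p.2 = true then some k else p.1))
      best
    = List.zipWith (fun b ml => match b with | some v => some v | none => pvFM ks ml) best ls := by
  induction ks generalizing best with
  | nil =>
    simp only [List.foldl_nil]
    rw [show (fun (b : Option String) (ml : String) =>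
          match b with | some v => some v | none => pvFM [] ml)
        = (fun (b : Option String) (_ : String) => b) from by
          funext b ml; cases b <;> simp [pvFM]]
    exact (pv_zipWith_left best ls hlen).symm
  | cons k rest ih =>
    rw [List.foldl_cons,
        pv_zip_map_eq_zipWith
          (fun b ml => if b = none ∧ PySem.Str.isIn k ml = true then some k else b) best ls,
        ih _ (by rw [List.length_zipWith]; omega)]
    apply pv_zipWith_zipWith
    intro b ml
    cases b with
    | some v => simp
    | none => cases hc : PySem.Chars.isIn k.toList ml.toList <;> simp [hc, pvFM, List.find?]

theorem pv_zipWith_replicate {α β γ : Type} (f : α → β → γ) (c : α) (xs : List β) :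
    List.zipWith f (List.replicate xs.length c) xs = xs.map (f c) := by
  induction xs with
  | nil => simp
  | cons x xs ih => simp [List.replicate_succ, ih]

theorem pv_fold_zip_map {α β γ : Type} (ms : List α) (g : α → β)
    (step : γ → α × β → γ) (init : γ) :
    (ms.zip (ms.map g)).foldl step init = ms.foldl (fun acc m => step acc (m, g m)) init := by
  induction ms generalizing init with
  | nil => rfl
  | cons m ms ih => simp [ih]

-- ===== VERDICT (by name: the statement is the Claim_ definition above) =====
theorem do_ground_truth_spec : Claim_equal_do_ground_truth := by
  intro methods keywords _
  unfold Spec_do_ground_truth do_ground_truth do_ground_truth_alt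
  dsimp only
  rw [show (List.replicate methods.length (none : Option String))
        = List.replicate (methods.map PySem.Str.lower).length none from by
        rw [List.length_map]]
  rw [pv_best_fold keywords _ _ (by simp), pv_zipWith_replicate, List.map_map,
      pv_fold_zip_map]
  congr 2
  funext gt m
  have hk : (pvFM keywords (PySem.Str.lower m)).getD "none" = find_match m keywords :=
    (pv_find_match_eq m keywords).symm
  simp only [Function.comp_apply, hk]
  by_cases h : PySem.Dict.contains gt (find_match m keywords)
  · simp [h]
  · have h' : gt.contains (find_match m keywords) = false := by simpa using h
    simp [h', PySem.Dict.getD_of_not_contains]
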